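-- pv_equiv track=rewrite | github.com/hajnyon/aoc-2025 | src/day-06.py | part1
-- ===== SOURCE A (Python) =====
-- def part1(data: str):
--     lines = data.splitlines()
--     operators = lines.pop().split()
--     numbers = [list(map(int, line.split())) for line in lines]
--     acc = list(map(lambda x: 0 if x == '+' else 1, operators))
--     for i in range(len(numbers)):
--         for j in range(len(numbers[i])):
--             is_sum = operators[j] == '+'
--             if is_sum:
--                 acc[j] += numbers[i][j]
--             else:
--                 acc[j] *= numbers[i][j]
--
--     return sum(acc)
-- ===== SOURCE B (Python) =====
-- def part1(data: str):
--     lines = data.splitlines()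
--     *rows, op_line = lines
--     operators = op_line.split()
--     numbers = [[int(t) for t in line.split()] for line in rows]
--     total = 0
--     for j, op in enumerate(operators):
--         col = [row[j] for row in numbers if j < len(row)]
--         if op == '+':
--             total += sum(col)
--         else:
--             p = 1
--             for v in col:
--                 p *= v
--             total += p
--     return total
-- ===== Notes on version B (the rewrite author's own statement) =====
-- stated objective: alternative
-- what changed: A fills a per-operator accumulator array row by row (acc[j] += / *= inside a nested index loop) and sums it at the end; B iterates over enumerate(operators), extracts each column once and reduces it directly with sum() or a product fold, adding into a running total.
import Mathlib
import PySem

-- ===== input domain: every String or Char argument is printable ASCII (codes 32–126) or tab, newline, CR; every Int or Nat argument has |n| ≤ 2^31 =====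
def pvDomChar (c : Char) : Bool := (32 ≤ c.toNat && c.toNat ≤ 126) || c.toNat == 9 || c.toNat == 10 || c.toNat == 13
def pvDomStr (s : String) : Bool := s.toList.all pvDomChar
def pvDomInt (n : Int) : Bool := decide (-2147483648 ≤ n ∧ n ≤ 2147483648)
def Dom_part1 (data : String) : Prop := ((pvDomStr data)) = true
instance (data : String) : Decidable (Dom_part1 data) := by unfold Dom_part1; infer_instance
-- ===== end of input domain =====

-- B replaces A's row-major in-place accumulator array by a column-wise reduction
-- (sum or product of each column, added into a running total): same values, different decomposition.

-- ===== PORT A =====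
-- A's row-major loop: acc[j] is updated for every element numbers[i][j]; finally sum(acc).
def part1 (data : String) : Int :=
  let lines := PySem.Str.splitlines data
  match PySem.List.pop? lines with
  | none => 0      -- lines.pop() raises IndexError on empty input; excluded by Pre_part1
  | some (opLine, rest) =>
    let operators := PySem.Str.split₀ opLine
    let numbers := rest.map (fun line =>
      (PySem.Str.split₀ line).map (fun t => (PySem.Int.ofStr? t).getD 0))  -- int() ValueError excluded by Pre_part1
    let acc0 := operators.map (fun x => if x = "+" then (0 : Int) else 1)
    let acc := (List.range numbers.length).foldl (fun acc i =>
      let row := numbers.getD i []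
      (List.range row.length).foldl (fun a j =>
        -- acc[j] / operators[j] out of range raise IndexError; excluded by Pre_part1
        a.set j (if operators.getD j "" = "+" then a.getD j 0 + row.getD j 0
                 else a.getD j 0 * row.getD j 0)) acc) acc0
    acc.foldl (· + ·) 0

-- ===== PORT B =====
-- B's column-wise reduction over enumerate(operators).
def part1_alt (data : String) : Int :=
  let lines := PySem.Str.splitlines data
  match lines.getLast? with
  | none => 0      -- '*rows, op_line = lines' raises ValueError on empty input; excluded by Pre_part1
  | some opLine =>
    let rows := lines.dropLast
    let operators := PySem.Str.split₀ opLine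
    let numbers := rows.map (fun line =>
      (PySem.Str.split₀ line).map (fun t => (PySem.Int.ofStr? t).getD 0))
    (PySem.List.enumerate operators).foldl (fun total p =>
      let col := numbers.filterMap (fun row => row[p.1.toNat]?)   -- [row[j] for row in numbers if j < len(row)]
      total + (if p.2 = "+" then col.sum else col.prod)) 0

-- ===== PRECONDITION & SPEC =====
-- Pre_ excludes exactly the inputs where A raises: empty input (pop of []), a token int() rejects
-- (ValueError), or a number row longer than the operator row (IndexError on operators[j]/acc[j]).
def Pre_part1 (data : String) : Prop :=
  let lines := PySem.Str.splitlines data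
  lines ≠ [] ∧
  ∀ line ∈ lines.dropLast,
    (∀ tok ∈ PySem.Str.split₀ line, (PySem.Int.ofStr? tok).isSome = true) ∧
    (PySem.Str.split₀ line).length ≤ (PySem.Str.split₀ (lines.getLast?.getD "")).length
instance (data : String) : Decidable (Pre_part1 data) := by unfold Pre_part1; infer_instance

def pvWitness_part1 : String := "1 2\n3 4\n+ *"

def Spec_part1 (data : String) (out : Int) : Prop := out = part1_alt data
instance (data : String) (out : Int) : Decidable (Spec_part1 data out) := by unfold Spec_part1; infer_instance

-- ===== CLAIM (what is proved, stated in full; the proofs are below) =====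
def Claim_equal_part1 : Prop := ∀ (data : String), Dom_part1 data → Pre_part1 data → Spec_part1 data (part1 data)

-- ===== LEMMAS AND PROOFS =====

-- A's inner loop over one row updates each index at most once; length is preserved.
theorem pv_inner_len (g : Nat → Int → Int) (n : Nat) (a : List Int) :
    ((List.range n).foldl (fun a j => a.set j (g j (a.getD j 0))) a).length = a.length := by
  induction n with
  | zero => rfl
  | succ n ih =>
    rw [List.range_succ, List.foldl_append]
    simp only [List.foldl_cons, List.foldl_nil, List.length_set]
    exact ih

-- the value at j after the inner loop: updated exactly when j < n and j is a real index of a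
theorem pv_inner_getD (g : Nat → Int → Int) (n : Nat) (a : List Int) (j : Nat) :
    ((List.range n).foldl (fun a j => a.set j (g j (a.getD j 0))) a).getD j 0
      = if j < n ∧ j < a.length then g j (a.getD j 0) else a.getD j 0 := by
  induction n generalizing j with
  | zero => simp
  | succ n ih =>
    rw [List.range_succ, List.foldl_append]
    simp only [List.foldl_cons, List.foldl_nil]
    rcases eq_or_ne j n with rfl | hne
    · by_cases hj : j < a.length
      · have hlen : ((List.range j).foldl (fun a k => a.set k (g k (a.getD k 0))) a).length = a.length :=
          pv_inner_len g j a
        rw [List.getD_eq_getElem?_getD, List.getElem?_set_self (by omega)]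
        rw [ih]
        simp [hj]
      · have hlen := pv_inner_len g j a
        rw [List.set_eq_of_length_le (by omega)]
        rw [ih]; simp [hj]
    · by_cases hjn : j < n
      · rw [List.getD_eq_getElem?_getD, List.getElem?_set_ne (by omega), ← List.getD_eq_getElem?_getD, ih]
        simp [hjn, Nat.lt_succ_of_lt hjn]
      · rw [List.getD_eq_getElem?_getD, List.getElem?_set_ne (by omega), ← List.getD_eq_getElem?_getD, ih]
        have h1 : ¬ j < n := hjn
        have h2 : ¬ j < n + 1 := by omega
        simp [h1, h2]

-- iterating over range(len(xs)) and indexing is iterating over xs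
theorem pv_foldl_range_getD {α β : Type} (h : β → α → β) (xs : List α) (d : α) (b : β) :
    (List.range xs.length).foldl (fun b i => h b (xs.getD i d)) b = xs.foldl h b := by
  induction xs generalizing b with
  | nil => rfl
  | cons x xs ih =>
    rw [List.length_cons, List.range_succ_eq_map, List.foldl_cons, List.foldl_map]
    simpa using ih (h b x)

theorem pv_outer_len (f : Nat → Int → Int → Int) (rows : List (List Int)) (a : List Int) :
    (rows.foldl (fun a row =>
        (List.range row.length).foldl (fun a k => a.set k (f k (a.getD k 0) (row.getD k 0))) a) a).length
      = a.length := by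
  induction rows generalizing a with
  | nil => rfl
  | cons row rows ih =>
    rw [List.foldl_cons, ih]
    exact pv_inner_len (fun k s => f k s (row.getD k 0)) row.length a

-- after A's outer loop, the value at j is the fold of f j over column j
theorem pv_outer_getD (f : Nat → Int → Int → Int) (rows : List (List Int)) (a : List Int) (j : Nat) :
    (rows.foldl (fun a row =>
        (List.range row.length).foldl (fun a k => a.set k (f k (a.getD k 0) (row.getD k 0))) a) a).getD j 0
      = if j < a.length then
          (rows.filterMap (fun row => row[j]?)).foldl (f j) (a.getD j 0)
        else 0 := by
  induction rows generalizing a with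
  | nil =>
    simp only [List.foldl_nil, List.filterMap_nil]
    by_cases hj : j < a.length
    · simp [hj]
    · simp [hj, List.getD_eq_getElem?_getD]
  | cons row rows ih =>
    rw [List.foldl_cons, ih]
    have hlen := pv_inner_len (fun k s => f k s (row.getD k 0)) row.length a
    have hget := pv_inner_getD (fun k s => f k s (row.getD k 0)) row.length a j
    rw [hlen, hget, List.filterMap_cons]
    by_cases hj : j < a.length
    · by_cases hr : j < row.length
      · have : row[j]? = some (row.getD j 0) := by
          simp [List.getD_eq_getElem?_getD, List.getElem?_eq_getElem hr]
        rw [this]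
        simp [hj, hr]
      · have : row[j]? = none := List.getElem?_eq_none (by omega)
        rw [this]
        simp [hj, hr]
    · simp [hj]

-- A's final accumulator, as a list, IS the list of B's per-column reductions
theorem pv_acc_eq (ops : List String) (numbers : List (List Int)) :
    (numbers.foldl (fun acc row =>
        (List.range row.length).foldl (fun a j =>
          a.set j (if ops.getD j "" = "+" then a.getD j 0 + row.getD j 0 else a.getD j 0 * row.getD j 0)) acc)
      (ops.map (fun x => if x = "+" then (0:Int) else 1)))
    = (PySem.List.enumerate ops).map (fun p =>
        if p.2 = "+" then (numbers.filterMap (fun row => row[p.1.toNat]?)).sum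
        else (numbers.filterMap (fun row => row[p.1.toNat]?)).prod) := by
  have hlen := pv_outer_len (fun k s v => if ops.getD k "" = "+" then s + v else s * v) numbers
      (ops.map fun x => if x = "+" then (0:Int) else 1)
  apply List.ext_getElem
  · rw [hlen]; simp [PySem.List.length_enumerate]
  · intro j h1 h2
    have hops : j < ops.length := by rw [hlen] at h1; simpa using h1
    have hacc := pv_outer_getD (fun k s v => if ops.getD k "" = "+" then s + v else s * v) numbers
        (ops.map fun x => if x = "+" then (0:Int) else 1) j
    rw [← List.getD_eq_getElem _ 0 h1, hacc]
    have hlt : j < (ops.map fun x => if x = "+" then (0:Int) else 1).length := by simpa using hops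
    rw [if_pos hlt]
    rw [List.getD_eq_getElem _ 0 hlt, List.getElem_map]
    simp only [List.getElem_map, PySem.List.getElem_enumerate]
    have hgd : ops.getD j "" = ops[j] := List.getD_eq_getElem _ "" hops
    have htn : ((0 : Int) + (j : Int)).toNat = j := by omega
    rw [htn]
    by_cases hop : ops[j] = "+"
    · simp only [hgd, hop, if_true]
      exact (List.sum_eq_foldl).symm
    · simp only [hgd, hop, if_false]
      exact (List.prod_eq_foldl).symm

-- the two ports agree whenever the input has at least one line
theorem pv_part1_eq (data : String) (h : PySem.Str.splitlines data ≠ []) :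
    part1 data = part1_alt data := by
  unfold part1 part1_alt
  dsimp only
  have hsplit : PySem.Str.splitlines data
      = (PySem.Str.splitlines data).dropLast ++ [(PySem.Str.splitlines data).getLast h] :=
    (List.dropLast_append_getLast h).symm
  rw [hsplit, PySem.List.pop?_last, List.getLast?_concat]
  simp only [List.dropLast_concat]
  set ops := PySem.Str.split₀ ((PySem.Str.splitlines data).getLast h) with hops
  set nums := List.map (fun line => List.map (fun t => (PySem.Int.ofStr? t).getD 0) (PySem.Str.split₀ line))
      (PySem.Str.splitlines data).dropLast with hnums
  rw [show (List.foldl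
        (fun acc i =>
          List.foldl
            (fun a j =>
              a.set j
                (if ops.getD j "" = "+" then a.getD j 0 + (nums.getD i []).getD j 0
                else a.getD j 0 * (nums.getD i []).getD j 0))
            acc (List.range (nums.getD i []).length))
        (List.map (fun x => if x = "+" then (0:Int) else 1) ops) (List.range nums.length))
      = (nums.foldl
        (fun acc row =>
          List.foldl
            (fun a j =>
              a.set j
                (if ops.getD j "" = "+" then a.getD j 0 + row.getD j 0
                else a.getD j 0 * row.getD j 0))
            acc (List.range row.length))
        (List.map (fun x => if x = "+" then (0:Int) else 1) ops))
      from pv_foldl_range_getD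
        (fun (acc : List Int) (row : List Int) =>
          List.foldl
            (fun (a : List Int) (j : Nat) =>
              a.set j
                (if ops.getD j "" = "+" then a.getD j 0 + row.getD j 0
                else a.getD j 0 * row.getD j 0))
            acc (List.range row.length)) nums [] _]
  rw [pv_acc_eq ops nums]
  rw [PySem.List.foldl_add
      (g := fun (p : Int × String) => if p.2 = "+" then (nums.filterMap (fun row => row[p.1.toNat]?)).sum
                     else (nums.filterMap (fun row => row[p.1.toNat]?)).prod)]
  rw [← List.sum_eq_foldl]
  rw [zero_add]

-- ===== VERDICT (by name: the statement is the Claim_ definition above) =====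
theorem part1_spec : Claim_equal_part1 := by
  intro data _ hpre
  have hne : PySem.Str.splitlines data ≠ [] := hpre.1
  unfold Spec_part1
  exact pv_part1_eq data hne
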